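-- pv_equiv track=rewrite | github.com/ASzot/Saak-Transform | clustering_helper.py | bin_labels
-- ===== SOURCE A (Python) =====
-- def bin_labels(labels, pred_labels):
--     freqs = {}
--     for label, pred_label in zip(labels, pred_labels):
--         if pred_label not in freqs:
--             freqs[pred_label] = {}
--         if label not in freqs[pred_label]:
--             freqs[pred_label][label] = 0
--         freqs[pred_label][label] += 1
--
--     return freqs
-- ===== SOURCE B (Python) =====
-- def bin_labels(labels, pred_labels):
--     # Two-phase group-by: first bucket the true labels by predicted label,
--     # then count each bucket into its inner dict.
--     groups = {}
--     for l, p in zip(labels, pred_labels):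
--         groups.setdefault(p, []).append(l)
--     freqs = {}
--     for p, ls in groups.items():
--         inner = {}
--         for l in ls:
--             inner[l] = inner.get(l, 0) + 1
--         freqs[p] = inner
--     return freqs
-- ===== Notes on version B (the rewrite author's own statement) =====
-- stated objective: alternative
-- what changed: A makes a single incremental pass over zip(labels, pred_labels) that grows the nested dict entry by entry (ensure outer key, ensure inner key, increment); B is a two-phase group-by: one pass buckets the true labels into a list per predicted label, then a second pass counts each bucket into its inner dict.
import Mathlib
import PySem

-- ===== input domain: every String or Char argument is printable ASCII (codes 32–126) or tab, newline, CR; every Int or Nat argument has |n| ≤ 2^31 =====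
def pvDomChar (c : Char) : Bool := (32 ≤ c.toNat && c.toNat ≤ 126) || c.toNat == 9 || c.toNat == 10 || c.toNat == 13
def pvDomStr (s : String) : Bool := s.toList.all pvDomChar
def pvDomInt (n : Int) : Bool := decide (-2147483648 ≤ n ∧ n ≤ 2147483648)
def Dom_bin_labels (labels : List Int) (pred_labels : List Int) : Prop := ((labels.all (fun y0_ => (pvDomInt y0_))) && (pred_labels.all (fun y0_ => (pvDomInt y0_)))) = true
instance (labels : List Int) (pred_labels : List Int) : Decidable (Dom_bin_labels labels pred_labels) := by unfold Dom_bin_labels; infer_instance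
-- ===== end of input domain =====

-- B replaces A's single incremental pass that grows the nested dict entry by entry with a
-- two-phase group-by: bucket the true labels by predicted label, then count each bucket;
-- alternative structure, same O(n) cost and the exact same result.

-- ===== PORT A =====
-- one iteration of A's loop body, lp = (label, pred_label)
def astep (freqs : PySem.Dict Int (PySem.Dict Int Int)) (lp : Int × Int) : PySem.Dict Int (PySem.Dict Int Int) :=
  let label := lp.1
  let pred_label := lp.2
  -- if pred_label not in freqs: freqs[pred_label] = {}
  let f1 := if freqs.contains pred_label then freqs else freqs.insert pred_label PySem.Dict.empty
  let inner0 := f1.getD pred_label PySem.Dict.empty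
  -- if label not in freqs[pred_label]: freqs[pred_label][label] = 0
  let f2 := if inner0.contains label then f1 else f1.insert pred_label (inner0.insert label 0)
  let inner1 := f2.getD pred_label PySem.Dict.empty
  -- freqs[pred_label][label] += 1
  f2.insert pred_label (inner1.insert label (inner1.getD label 0 + 1))

def bin_labels (labels : List Int) (pred_labels : List Int) : List (Int × List (Int × Int)) :=
  ((labels.zip pred_labels).foldl astep PySem.Dict.empty).items.map (fun q => (q.1, q.2.items))

-- ===== PORT B =====
-- phase 1 step: 'groups.setdefault(p, []).append(l)' — appends l to the bucket at p
-- (exact: overwrite keeps the key's position, a new key appends, matching setdefault+append)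
def bgroup (g : PySem.Dict Int (List Int)) (x : Int × Int) : PySem.Dict Int (List Int) :=
  g.insert x.2 (g.getD x.2 [] ++ [x.1])

-- phase 2 inner loop: 'for l in ls: inner[l] = inner.get(l, 0) + 1'
def bcount (ls : List Int) : PySem.Dict Int Int :=
  ls.foldl (fun inner l => inner.insert l (inner.getD l 0 + 1)) PySem.Dict.empty

def bin_labels_alt (labels : List Int) (pred_labels : List Int) : List (Int × List (Int × Int)) :=
  let groups := (labels.zip pred_labels).foldl bgroup PySem.Dict.empty
  -- 'for p, ls in groups.items(): ... freqs[p] = inner'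
  (groups.items.foldl (fun freqs q => freqs.insert q.1 (bcount q.2)) PySem.Dict.empty).items.map
    (fun q => (q.1, q.2.items))

-- ===== PRECONDITION & SPEC =====
def Spec_bin_labels (labels : List Int) (pred_labels : List Int) (out : List (Int × List (Int × Int))) : Prop := out = bin_labels_alt labels pred_labels
instance (labels : List Int) (pred_labels : List Int) (out : List (Int × List (Int × Int))) : Decidable (Spec_bin_labels labels pred_labels out) := by unfold Spec_bin_labels; infer_instance

-- ===== CLAIM (what is proved, stated in full; the proofs are below) =====
def Claim_equal_bin_labels : Prop := ∀ (labels : List Int) (pred_labels : List Int), Dom_bin_labels labels pred_labels → Spec_bin_labels labels pred_labels (bin_labels labels pred_labels)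

-- ===== LEMMAS AND PROOFS =====

theorem anybeq (ks : List Int) (k : Int) : (ks.any fun x => x == k) = decide (k ∈ ks) := by
  induction ks with
  | nil => simp
  | cons a t ih =>
      by_cases h : a = k
      · subst h; simp [List.any_cons, ih]
      · simp [List.any_cons, ih, beq_iff_eq, h, Ne.symm h]

theorem contains_mk_map {ν : Type} (ks : List Int) (f : Int → ν) (k : Int) :
    (PySem.Dict.mk (ks.map (fun k' => (k', f k')))).contains k = decide (k ∈ ks) := by
  simp only [PySem.Dict.contains_mk, List.any_map, Function.comp_def]
  exact anybeq ks k

theorem getD_mk_map {ν : Type} (ks : List Int) (f : Int → ν) (hnd : ks.Nodup) {k : Int}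
    (hk : k ∈ ks) (d0 : ν) :
    (PySem.Dict.mk (ks.map (fun k' => (k', f k')))).getD k d0 = f k := by
  apply PySem.Dict.getD_of_mem_items
  · exact List.mem_map.2 ⟨k, hk, rfl⟩
  · simpa [PySem.Dict.keys_mk, List.map_map, Function.comp_def] using hnd

-- insert at an existing key of a table dict = replace that entry pointwise
theorem insert_mk_map_mem {ν : Type} (ks : List Int) (g g' : Int → ν) {p : Int} (v : ν)
    (hp : p ∈ ks)
    (hne : ∀ p' ∈ ks, p' ≠ p → g' p' = g p') (hv : g' p = v) :
    (PySem.Dict.mk (ks.map (fun k' => (k', g k')))).insert p v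
      = PySem.Dict.mk (ks.map (fun k' => (k', g' k'))) := by
  apply PySem.Dict.ext
  rw [PySem.Dict.items_insert_of_contains]
  · show (List.map (fun k' => (k', g k')) ks).map _ = _
    rw [List.map_map]
    apply List.map_congr_left
    intro a ha
    by_cases h : a = p
    · subst h; simp [Function.comp_def, hv]
    · simp [Function.comp_def, beq_iff_eq, h, hne a ha h]
  · rw [contains_mk_map]; exact decide_eq_true hp

theorem insert_mk_map_not_mem {ν : Type} (ks : List Int) (g : Int → ν) {p : Int} (v : ν)
    (hp : p ∉ ks) :
    (PySem.Dict.mk (ks.map (fun k' => (k', g k')))).insert p v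
      = PySem.Dict.mk (ks.map (fun k' => (k', g k')) ++ [(p, v)]) := by
  apply PySem.Dict.ext
  rw [PySem.Dict.items_insert_of_not_contains]
  rw [contains_mk_map]; exact decide_eq_false hp

theorem mem_map_fst_filter (zs : List (Int × Int)) (l p : Int) :
    l ∈ (zs.filter (fun x => x.2 == p)).map (·.1) ↔ (l, p) ∈ zs := by
  simp only [List.mem_map, List.mem_filter, beq_iff_eq]
  constructor
  · rintro ⟨x, ⟨hx, h2⟩, h1⟩; cases x; simp_all
  · intro h; exact ⟨(l, p), ⟨h, rfl⟩, rfl⟩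

def innerA (zs : List (Int × Int)) (p : Int) : PySem.Dict Int Int :=
  PySem.Dict.mk ((PySem.List.dedup ((zs.filter (fun x => x.2 == p)).map (·.1))).map
    (fun l => (l, (zs.count (l, p) : Int))))

def nestedOf (zs : List (Int × Int)) : PySem.Dict Int (PySem.Dict Int Int) :=
  PySem.Dict.mk ((PySem.List.dedup (zs.map (·.2))).map (fun p => (p, innerA zs p)))

theorem count_append_single (zs : List (Int × Int)) (a b : Int × Int) :
    (zs ++ [a]).count b = zs.count b + (if a = b then 1 else 0) := by
  simp [List.count_append, List.count_cons, List.count_nil, beq_iff_eq]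

theorem innerA_congr (zs : List (Int × Int)) (l p p' : Int) (h : p' ≠ p) :
    innerA (zs ++ [(l, p)]) p' = innerA zs p' := by
  unfold innerA
  have hf : (zs ++ [(l, p)]).filter (fun x => x.2 == p') = zs.filter (fun x => x.2 == p') := by
    simp [List.filter_append, List.filter_singleton, beq_iff_eq, Ne.symm h]
  rw [hf]
  congr 1
  apply List.map_congr_left
  intro a _
  rw [count_append_single,
    if_neg (fun hc : (l, p) = (a, p') => h (Prod.ext_iff.1 hc).2.symm)]
  simp

theorem astep_nested (zs : List (Int × Int)) (l p : Int) :
    astep (nestedOf zs) (l, p) = nestedOf (zs ++ [(l, p)]) := by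
  have hkl : PySem.List.dedup ((zs ++ [(l, p)]).map (·.2))
      = PySem.Set.add (PySem.List.dedup (zs.map (·.2))) p := by
    simp only [List.map_append, List.map_singleton, PySem.List.dedup_eq_ofList,
      PySem.Set.ofList_append_singleton]
  have hcont : (nestedOf zs).contains p
      = decide (p ∈ PySem.List.dedup (zs.map (·.2))) := contains_mk_map _ _ p
  show (let f1 := if (nestedOf zs).contains p then nestedOf zs
          else (nestedOf zs).insert p PySem.Dict.empty
        let inner0 := f1.getD p PySem.Dict.empty
        let f2 := if inner0.contains l then f1 else f1.insert p (inner0.insert l 0)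
        let inner1 := f2.getD p PySem.Dict.empty
        f2.insert p (inner1.insert l (inner1.getD l 0 + 1)))
      = nestedOf (zs ++ [(l, p)])
  by_cases hp : p ∈ PySem.List.dedup (zs.map (·.2))
  · -- p already an outer key
    have hgd : (nestedOf zs).getD p PySem.Dict.empty = innerA zs p :=
      getD_mk_map _ _ (PySem.List.nodup_dedup _) hp _
    have hicont : (innerA zs p).contains l
        = decide (l ∈ PySem.List.dedup ((zs.filter (fun x => x.2 == p)).map (·.1))) :=
      contains_mk_map _ _ l
    simp only [hcont, if_pos (decide_eq_true hp), hgd]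
    by_cases hl : l ∈ PySem.List.dedup ((zs.filter (fun x => x.2 == p)).map (·.1))
    · -- (l, p) was seen before: bump its count in place
      have hgl : (innerA zs p).getD l 0 = (zs.count (l, p) : Int) :=
        getD_mk_map _ _ (PySem.List.nodup_dedup _) hl _
      simp only [hicont, if_pos (decide_eq_true hl), hgd, hgl]
      unfold nestedOf
      rw [hkl, PySem.Set.add_of_mem hp]
      apply insert_mk_map_mem _ _ _ _ hp
      · intro p' _ hne; exact innerA_congr zs l p p' hne
      · have hLeq : PySem.List.dedup (((zs ++ [(l, p)]).filter (fun x => x.2 == p)).map (·.1))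
            = PySem.List.dedup ((zs.filter (fun x => x.2 == p)).map (·.1)) := by
          simp only [List.filter_append, List.filter_singleton, beq_self_eq_true, cond_true,
            List.map_append, List.map_singleton, PySem.List.dedup_eq_ofList,
            PySem.Set.ofList_append_singleton]
          exact PySem.Set.add_of_mem (by simpa [PySem.List.dedup_eq_ofList] using hl)
        unfold innerA
        rw [hLeq]
        symm
        apply insert_mk_map_mem _ _ _ _ hl
        · intro l' _ hne
          rw [count_append_single,
            if_neg (fun hc : (l, p) = (l', p) => hne ((Prod.ext_iff.1 hc).1).symm)]
          simp
        · rw [count_append_single, if_pos rfl]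
          push_cast; ring
    · -- p key exists but l is new in the inner dict
      have hlz : (l, p) ∉ zs :=
        fun h => hl ((PySem.List.mem_dedup _ _).2 ((mem_map_fst_filter zs l p).2 h))
      simp only [hicont, decide_eq_false hl, Bool.false_eq_true, if_false,
        PySem.Dict.getD_insert_self, PySem.Dict.insert_insert_self]
      unfold nestedOf
      rw [hkl, PySem.Set.add_of_mem hp]
      apply insert_mk_map_mem _ _ _ _ hp
      · intro p' _ hne; exact innerA_congr zs l p p' hne
      · have hLeq : PySem.List.dedup (((zs ++ [(l, p)]).filter (fun x => x.2 == p)).map (·.1))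
            = PySem.List.dedup ((zs.filter (fun x => x.2 == p)).map (·.1)) ++ [l] := by
          simp only [List.filter_append, List.filter_singleton, beq_self_eq_true, cond_true,
            List.map_append, List.map_singleton, PySem.List.dedup_eq_ofList,
            PySem.Set.ofList_append_singleton]
          exact PySem.Set.add_of_not_mem (by simpa [PySem.List.dedup_eq_ofList] using hl)
        unfold innerA
        rw [hLeq, List.map_append, List.map_singleton]
        rw [insert_mk_map_not_mem _ _ _ hl]
        congr 1
        congr 1
        · apply List.map_congr_left
          intro l' hl'
          have hne : l' ≠ l := fun he => hl (he ▸ hl')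
          rw [count_append_single,
            if_neg (fun hc : (l, p) = (l', p) => hne ((Prod.ext_iff.1 hc).1).symm)]
          simp
        · rw [count_append_single, if_pos rfl, List.count_eq_zero.2 hlz]
          simp
  · -- p is a new outer key
    have hz : p ∉ zs.map (·.2) := fun h => hp ((PySem.List.mem_dedup _ _).2 h)
    have hfe : zs.filter (fun x => x.2 == p) = [] := by
      rw [List.filter_eq_nil_iff]
      intro a ha hb
      exact hz (List.mem_map.2 ⟨a, ha, beq_iff_eq.1 hb⟩)
    simp only [hcont, decide_eq_false hp, Bool.false_eq_true, if_false,
      PySem.Dict.getD_insert_self, PySem.Dict.contains_empty,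
      PySem.Dict.insert_insert_self]
    have hemp : PySem.Dict.empty.insert l ((0 : Int) + 1) = PySem.Dict.mk [(l, 0 + 1)] := by
      apply PySem.Dict.ext
      rw [PySem.Dict.items_insert_of_not_contains _ _ (by simp [PySem.Dict.contains_empty])]
      rfl
    rw [hemp]
    unfold nestedOf
    rw [hkl, PySem.Set.add_of_not_mem hp, List.map_append, List.map_singleton]
    rw [insert_mk_map_not_mem _ _ _ hp]
    congr 1
    congr 1
    · apply List.map_congr_left
      intro p' hp'
      have hne : p' ≠ p := fun he => hp (he ▸ hp')
      rw [innerA_congr zs l p p' hne]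
    · have hlz : (l, p) ∉ zs := fun h => hz (List.mem_map.2 ⟨(l, p), h, rfl⟩)
      unfold innerA
      have hfx : (zs ++ [(l, p)]).filter (fun x => x.2 == p) = [(l, p)] := by
        simp [List.filter_append, hfe]
      rw [hfx]
      simp [PySem.List.dedup_eq_ofList,
        PySem.Set.ofList_eq_self_of_nodup _ (List.nodup_singleton l),
        List.count_eq_zero.2 hlz, List.count_cons, List.count_nil]

theorem foldl_astep (zs : List (Int × Int)) :
    zs.foldl astep PySem.Dict.empty = nestedOf zs := by
  induction zs using List.reverseRecOn with
  | nil => rfl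
  | append_singleton zs x ih =>
      rw [List.foldl_append, List.foldl_cons, List.foldl_nil, ih]
      obtain ⟨l, p⟩ := x
      exact astep_nested zs l p

-- B-side lemmas: characterize phase 1, then phase 2

theorem count_fst_filter (zs : List (Int × Int)) (l p : Int) :
    ((zs.filter (fun x => x.2 == p)).map (·.1)).count l = zs.count (l, p) := by
  induction zs with
  | nil => rfl
  | cons a t ih =>
      obtain ⟨x, y⟩ := a
      by_cases hy : y = p
      · subst hy
        by_cases hx : x = l <;>
          simp [List.filter_cons, List.count_cons, ih, hx, Prod.ext_iff]
      · simp [List.filter_cons, List.count_cons, beq_iff_eq, hy, ih, Prod.ext_iff]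

def groupsOf (zs : List (Int × Int)) : PySem.Dict Int (List Int) :=
  PySem.Dict.mk ((PySem.List.dedup (zs.map (·.2))).map
    (fun p => (p, (zs.filter (fun x => x.2 == p)).map (·.1))))

theorem bgroup_groupsOf (zs : List (Int × Int)) (l p : Int) :
    bgroup (groupsOf zs) (l, p) = groupsOf (zs ++ [(l, p)]) := by
  have hkl : PySem.List.dedup ((zs ++ [(l, p)]).map (·.2))
      = PySem.Set.add (PySem.List.dedup (zs.map (·.2))) p := by
    simp only [List.map_append, List.map_singleton, PySem.List.dedup_eq_ofList,
      PySem.Set.ofList_append_singleton]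
  have hfilter_ne : ∀ p' : Int, p' ≠ p →
      (zs ++ [(l, p)]).filter (fun x => x.2 == p') = zs.filter (fun x => x.2 == p') := by
    intro p' h
    simp [List.filter_append, beq_iff_eq, Ne.symm h]
  show (groupsOf zs).insert p ((groupsOf zs).getD p [] ++ [l]) = groupsOf (zs ++ [(l, p)])
  by_cases hp : p ∈ PySem.List.dedup (zs.map (·.2))
  · have hgd : (groupsOf zs).getD p [] = (zs.filter (fun x => x.2 == p)).map (·.1) :=
      getD_mk_map _ _ (PySem.List.nodup_dedup _) hp _
    rw [hgd]
    unfold groupsOf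
    rw [hkl, PySem.Set.add_of_mem hp]
    apply insert_mk_map_mem _ _ _ _ hp
    · intro p' _ hne; rw [hfilter_ne p' hne]
    · have : (zs ++ [(l, p)]).filter (fun x => x.2 == p)
          = zs.filter (fun x => x.2 == p) ++ [(l, p)] := by
        simp [List.filter_append]
      rw [this, List.map_append, List.map_singleton]
  · have hcont : (groupsOf zs).contains p = false := by
      unfold groupsOf; rw [contains_mk_map]; exact decide_eq_false hp
    rw [PySem.Dict.getD_of_not_contains _ _ hcont, List.nil_append]
    unfold groupsOf
    rw [hkl, PySem.Set.add_of_not_mem hp, List.map_append, List.map_singleton]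
    rw [insert_mk_map_not_mem _ _ _ hp]
    congr 1
    congr 1
    · apply List.map_congr_left
      intro p' hp'
      have hne : p' ≠ p := fun he => hp (he ▸ hp')
      rw [hfilter_ne p' hne]
    · have hz : p ∉ zs.map (·.2) := fun h => hp ((PySem.List.mem_dedup _ _).2 h)
      have hfe : zs.filter (fun x => x.2 == p) = [] := by
        rw [List.filter_eq_nil_iff]
        intro a ha hb
        exact hz (List.mem_map.2 ⟨a, ha, beq_iff_eq.1 hb⟩)
      simp [List.filter_append, hfe]

theorem foldl_bgroup (zs : List (Int × Int)) :
    zs.foldl bgroup PySem.Dict.empty = groupsOf zs := by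
  induction zs using List.reverseRecOn with
  | nil => rfl
  | append_singleton zs x ih =>
      rw [List.foldl_append, List.foldl_cons, List.foldl_nil, ih]
      obtain ⟨l, p⟩ := x
      exact bgroup_groupsOf zs l p

theorem bcount_eq_innerA (zs : List (Int × Int)) (p : Int) :
    bcount ((zs.filter (fun x => x.2 == p)).map (·.1)) = innerA zs p := by
  unfold bcount
  rw [PySem.Dict.foldl_insert_getD_add_one_eq_counter]
  apply PySem.Dict.ext
  rw [PySem.Dict.items_counter]
  unfold innerA
  simp only [PySem.List.dedup_eq_ofList]
  apply List.map_congr_left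
  intro l hl
  rw [← count_fst_filter zs l p]

-- inserting along a nodup key list builds the table dict
theorem foldl_insert_nodup {ν : Type} (ks : List Int) (f : Int → ν) (hnd : ks.Nodup) :
    ks.foldl (fun (d : PySem.Dict Int ν) p => d.insert p (f p)) PySem.Dict.empty
      = PySem.Dict.mk (ks.map (fun p => (p, f p))) := by
  induction ks using List.reverseRecOn with
  | nil => rfl
  | append_singleton ks p ih =>
      rw [List.nodup_append] at hnd
      obtain ⟨h1, _, h3⟩ := hnd
      have hp : p ∉ ks := fun hm => h3 p hm p (List.mem_singleton.2 rfl) rfl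
      rw [List.foldl_append, List.foldl_cons, List.foldl_nil, ih h1,
        List.map_append, List.map_singleton]
      apply PySem.Dict.ext
      rw [PySem.Dict.items_insert_of_not_contains]
      rw [contains_mk_map]
      exact decide_eq_false hp

-- ===== VERDICT (by name: the statement is the Claim_ definition above) =====
theorem bin_labels_spec : Claim_equal_bin_labels := by
  intro labels pred_labels _
  unfold Spec_bin_labels
  simp only [bin_labels, bin_labels_alt]
  rw [foldl_astep, foldl_bgroup]
  have hitems : (groupsOf (labels.zip pred_labels)).items
      = (PySem.List.dedup ((labels.zip pred_labels).map (·.2))).map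
          (fun p => (p, ((labels.zip pred_labels).filter (fun x => x.2 == p)).map (·.1))) := rfl
  rw [hitems, List.foldl_map,
    foldl_insert_nodup _ _ (PySem.List.nodup_dedup ((labels.zip pred_labels).map (·.2)))]
  have : ∀ p, bcount (((labels.zip pred_labels).filter (fun x => x.2 == p)).map (·.1))
      = innerA (labels.zip pred_labels) p := fun p => bcount_eq_innerA _ p
  simp only [this]
  rfl
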